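-- pv_equiv track=rewrite | github.com/nermadie/CodeForces_Solutions | CodeforcesRound963Div2/prob01.py | solve
-- ===== SOURCE A (Python) =====
-- def solve(n, s):
--     count = {"A": 0, "B": 0, "C": 0, "D": 0}
--     for c in s:
--         if c == "A":
--             count["A"] += 1
--         if c == "B":
--             count["B"] += 1
--         if c == "C":
--             count["C"] += 1
--         if c == "D":
--             count["D"] += 1
--     result = 0
--     for k, v in count.items():
--         result += min(n, v)
--     return result
-- ===== SOURCE B (Python) =====
-- def solve(n, s):
--     # Sort-then-scan: sort the characters, walk maximal runs of equal
--     # characters, record each run's length, then sum min(n, run length)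
--     # over the four fixed letters (absent letters have run length 0).
--     t = sorted(s)
--     runs = {}
--     i = 0
--     while i < len(t):
--         j = i
--         while j < len(t) and t[j] == t[i]:
--             j += 1
--         runs[t[i]] = j - i
--         i = j
--     return sum(min(n, runs.get(c, 0)) for c in "ABCD")
-- ===== Notes on version B (the rewrite author's own statement) =====
-- stated objective: alternative
-- what changed: Replaced A's single-pass dict tally (increment one of four counters per character) with sort-then-scan: sort the characters, walk maximal runs of equal characters recording each run's length, then sum min(n, run length) over the fixed letters 'ABCD'.
import Mathlib
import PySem

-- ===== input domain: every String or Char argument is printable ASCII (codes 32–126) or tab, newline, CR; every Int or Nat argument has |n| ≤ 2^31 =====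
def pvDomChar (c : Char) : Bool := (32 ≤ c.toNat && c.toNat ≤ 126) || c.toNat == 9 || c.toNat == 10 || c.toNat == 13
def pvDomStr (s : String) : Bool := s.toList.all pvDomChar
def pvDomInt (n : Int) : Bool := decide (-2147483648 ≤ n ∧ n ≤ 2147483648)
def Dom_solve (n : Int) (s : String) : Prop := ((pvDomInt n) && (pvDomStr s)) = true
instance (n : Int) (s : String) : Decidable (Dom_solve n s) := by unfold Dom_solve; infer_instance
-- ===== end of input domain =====

-- B replaces A's single-pass tally loop by sort-then-scan: sort the characters,
-- walk maximal runs of equal characters recording run lengths, then sum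
-- min(n, run length) over the fixed letters "ABCD" (objective: alternative algorithm).

-- ===== PORT A =====
def solve (n : Int) (s : String) : Int :=
  let count : PySem.Dict Char Int := PySem.Dict.ofList [('A',0),('B',0),('C',0),('D',0)]
  let count := s.toList.foldl (fun d c =>
    let d := if c == 'A' then d.insert 'A' (d.getD 'A' 0 + 1) else d
    let d := if c == 'B' then d.insert 'B' (d.getD 'B' 0 + 1) else d
    let d := if c == 'C' then d.insert 'C' (d.getD 'C' 0 + 1) else d
    if c == 'D' then d.insert 'D' (d.getD 'D' 0 + 1) else d) count
  count.items.foldl (fun result kv => result + min n kv.2) 0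

-- ===== PORT B =====
-- The outer while loop of Source B: consume one maximal run per step
-- (the inner 'while t[j] == t[i]: j += 1' is the takeWhile/dropWhile split),
-- recording its length in the runs dict.
def runLoop : List Char → PySem.Dict Char Int → PySem.Dict Char Int
  | [], runs => runs
  | c :: rest, runs =>
      let run := rest.takeWhile (fun x => x == c)
      runLoop (rest.dropWhile (fun x => x == c)) (runs.insert c (1 + run.length))
termination_by t _ => t.length
decreasing_by
  have := List.length_dropWhile_le (fun x => x == c) rest
  simp; omega

def solve_alt (n : Int) (s : String) : Int :=
  let t := PySem.List.sorted s.toList (fun x => x) false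
  let runs := runLoop t PySem.Dict.empty
  ("ABCD".toList.map (fun c => min n (runs.getD c 0))).sum

-- ===== PRECONDITION & SPEC =====
def Spec_solve (n : Int) (s : String) (out : Int) : Prop := out = solve_alt n s
instance (n : Int) (s : String) (out : Int) : Decidable (Spec_solve n s out) := by unfold Spec_solve; infer_instance

-- ===== CLAIM (what is proved, stated in full; the proofs are below) =====
def Claim_equal_solve : Prop := ∀ (n : Int) (s : String), Dom_solve n s → Spec_solve n s (solve n s)

-- ===== LEMMAS AND PROOFS =====

-- Invariant of A's counting fold: each of the four fixed slots accumulates its letter count.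
lemma dict_fold_inv (l : List Char) : ∀ (a b c d : Int),
    l.foldl (fun d c =>
        let d := if c == 'A' then d.insert 'A' (d.getD 'A' 0 + 1) else d
        let d := if c == 'B' then d.insert 'B' (d.getD 'B' 0 + 1) else d
        let d := if c == 'C' then d.insert 'C' (d.getD 'C' 0 + 1) else d
        if c == 'D' then d.insert 'D' (d.getD 'D' 0 + 1) else d)
      (PySem.Dict.mk [('A',a),('B',b),('C',c),('D',d)]) =
    PySem.Dict.mk [('A', a + l.count 'A'), ('B', b + l.count 'B'),
                   ('C', c + l.count 'C'), ('D', d + l.count 'D')] := by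
  induction l with
  | nil => intro a b c d; simp
  | cons x t ih =>
    intro a b c d
    rw [List.foldl_cons]
    by_cases hA : x = 'A'
    · subst hA
      have : (let d' := if 'A' == 'A' then (PySem.Dict.mk [('A',a),('B',b),('C',c),('D',d)]).insert 'A' ((PySem.Dict.mk [('A',a),('B',b),('C',c),('D',d)]).getD 'A' 0 + 1) else (PySem.Dict.mk [('A',a),('B',b),('C',c),('D',d)])
              let d' := if 'A' == 'B' then d'.insert 'B' (d'.getD 'B' 0 + 1) else d'
              let d' := if 'A' == 'C' then d'.insert 'C' (d'.getD 'C' 0 + 1) else d'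
              if 'A' == 'D' then d'.insert 'D' (d'.getD 'D' 0 + 1) else d') =
            PySem.Dict.mk [('A',a+1),('B',b),('C',c),('D',d)] := by rfl
      rw [this, ih]
      simp
      omega
    · by_cases hB : x = 'B'
      · subst hB
        have : (let d' := if 'B' == 'A' then (PySem.Dict.mk [('A',a),('B',b),('C',c),('D',d)]).insert 'A' ((PySem.Dict.mk [('A',a),('B',b),('C',c),('D',d)]).getD 'A' 0 + 1) else (PySem.Dict.mk [('A',a),('B',b),('C',c),('D',d)])
                let d' := if 'B' == 'B' then d'.insert 'B' (d'.getD 'B' 0 + 1) else d'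
                let d' := if 'B' == 'C' then d'.insert 'C' (d'.getD 'C' 0 + 1) else d'
                if 'B' == 'D' then d'.insert 'D' (d'.getD 'D' 0 + 1) else d') =
              PySem.Dict.mk [('A',a),('B',b+1),('C',c),('D',d)] := by rfl
        rw [this, ih]
        simp [hA]
        omega
      · by_cases hC : x = 'C'
        · subst hC
          have : (let d' := if 'C' == 'A' then (PySem.Dict.mk [('A',a),('B',b),('C',c),('D',d)]).insert 'A' ((PySem.Dict.mk [('A',a),('B',b),('C',c),('D',d)]).getD 'A' 0 + 1) else (PySem.Dict.mk [('A',a),('B',b),('C',c),('D',d)])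
                  let d' := if 'C' == 'B' then d'.insert 'B' (d'.getD 'B' 0 + 1) else d'
                  let d' := if 'C' == 'C' then d'.insert 'C' (d'.getD 'C' 0 + 1) else d'
                  if 'C' == 'D' then d'.insert 'D' (d'.getD 'D' 0 + 1) else d') =
                PySem.Dict.mk [('A',a),('B',b),('C',c+1),('D',d)] := by rfl
          rw [this, ih]
          simp [hA, hB]
          omega
        · by_cases hD : x = 'D'
          · subst hD
            have : (let d' := if 'D' == 'A' then (PySem.Dict.mk [('A',a),('B',b),('C',c),('D',d)]).insert 'A' ((PySem.Dict.mk [('A',a),('B',b),('C',c),('D',d)]).getD 'A' 0 + 1) else (PySem.Dict.mk [('A',a),('B',b),('C',c),('D',d)])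
                    let d' := if 'D' == 'B' then d'.insert 'B' (d'.getD 'B' 0 + 1) else d'
                    let d' := if 'D' == 'C' then d'.insert 'C' (d'.getD 'C' 0 + 1) else d'
                    if 'D' == 'D' then d'.insert 'D' (d'.getD 'D' 0 + 1) else d') =
                  PySem.Dict.mk [('A',a),('B',b),('C',c),('D',d+1)] := by rfl
            rw [this, ih]
            simp [hA, hB, hC]
            omega
          · have : (let d' := if x == 'A' then (PySem.Dict.mk [('A',a),('B',b),('C',c),('D',d)]).insert 'A' ((PySem.Dict.mk [('A',a),('B',b),('C',c),('D',d)]).getD 'A' 0 + 1) else (PySem.Dict.mk [('A',a),('B',b),('C',c),('D',d)])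
                    let d' := if x == 'B' then d'.insert 'B' (d'.getD 'B' 0 + 1) else d'
                    let d' := if x == 'C' then d'.insert 'C' (d'.getD 'C' 0 + 1) else d'
                    if x == 'D' then d'.insert 'D' (d'.getD 'D' 0 + 1) else d') =
                  PySem.Dict.mk [('A',a),('B',b),('C',c),('D',d)] := by
              simp [hA, hB, hC, hD]
            rw [this, ih]
            simp [hA, hB, hC, hD]

-- On a sorted (nondecreasing) list, the run table records exactly the counts.
lemma runLoop_getD (l : List Char) (hs : l.Pairwise (· ≤ ·)) (d : PySem.Dict Char Int) (c : Char) :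
    (runLoop l d).getD c 0 = if c ∈ l then (l.count c : Int) else d.getD c 0 := by
  match l, hs with
  | [], _ => simp [runLoop]
  | x :: rest, hs =>
    have hrest : rest.Pairwise (· ≤ ·) := hs.of_cons
    have hle : ∀ y ∈ rest, x ≤ y := fun y hy => List.rel_of_pairwise_cons hs hy
    have hsplit : rest.takeWhile (fun y => y == x) ++ rest.dropWhile (fun y => y == x) = rest :=
      List.takeWhile_append_dropWhile
    have hrest' : (rest.dropWhile (fun y => y == x)).Pairwise (· ≤ ·) :=
      hrest.sublist (List.dropWhile_sublist _)
    have hrun : ∀ y ∈ rest.takeWhile (fun y => y == x), y = x := by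
      intro y hy
      have := List.mem_takeWhile_imp hy
      simpa using this
    have hnot : x ∉ rest.dropWhile (fun y => y == x) := by
      cases hd : rest.dropWhile (fun y => y == x) with
      | nil => simp
      | cons y t =>
        have hy_ne : ¬ (y == x) = true := by
          have := List.head_dropWhile_not (fun y => y == x) (l := rest) (by simp [hd])
          simpa [hd] using this
        have hy_mem : y ∈ rest := by
          have : y ∈ rest.dropWhile (fun y => y == x) := by simp [hd]
          exact (List.dropWhile_sublist _).mem this
        have hxy : x < y := lt_of_le_of_ne (hle y hy_mem) (fun h => hy_ne (by simp [h]))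
        have hyt : ∀ z ∈ t, y ≤ z := by
          have := hrest'
          rw [hd] at this
          exact fun z hz => List.rel_of_pairwise_cons this hz
        intro hmem
        rcases List.mem_cons.mp hmem with h | h
        · exact absurd h.symm (ne_of_gt hxy)
        · exact absurd rfl (ne_of_lt (lt_of_lt_of_le hxy (hyt x h)))
    have ih := runLoop_getD (rest.dropWhile (fun y => y == x)) hrest'
        (d.insert x (1 + ((rest.takeWhile (fun y => y == x)).length : Int))) c
    have hc_split : ∀ z : Char, rest.count z =
        (rest.takeWhile (fun y => y == x)).count z + (rest.dropWhile (fun y => y == x)).count z := by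
      intro z
      conv_lhs => rw [← hsplit]
      rw [List.count_append]
    have hm_split : ∀ z : Char, z ∈ rest ↔
        z ∈ rest.takeWhile (fun y => y == x) ∨ z ∈ rest.dropWhile (fun y => y == x) := by
      intro z
      conv_lhs => rw [← hsplit]
      exact List.mem_append
    have hcount_run : ∀ z, z ≠ x → (rest.takeWhile (fun y => y == x)).count z = 0 := by
      intro z hz
      exact List.count_eq_zero.mpr (fun hm => hz (hrun z hm))
    have hcount_run_x : (rest.takeWhile (fun y => y == x)).count x =
        (rest.takeWhile (fun y => y == x)).length := by
      apply List.count_eq_length.mpr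
      intro y hy; exact (hrun y hy).symm
    rw [runLoop]
    rw [ih]
    by_cases hcx : c = x
    · subst hcx
      rw [if_neg hnot, if_pos (List.mem_cons_self), PySem.Dict.getD_insert_self]
      rw [List.count_cons_self, hc_split c, hcount_run_x, List.count_eq_zero.mpr hnot]
      push_cast
      ring
    · have hcl : (c ∈ x :: rest) ↔ c ∈ rest.dropWhile (fun y => y == x) := by
        constructor
        · intro hm
          rcases List.mem_cons.mp hm with h | h
          · exact absurd h hcx
          · rcases (hm_split c).mp h with h | h
            · exact absurd (hrun c h) hcx
            · exact h
        · intro hm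
          exact List.mem_cons_of_mem _ ((hm_split c).mpr (Or.inr hm))
      have hcl_count : (x :: rest).count c = (rest.dropWhile (fun y => y == x)).count c := by
        rw [List.count_cons_of_ne (fun h => hcx h.symm), hc_split c, hcount_run c hcx]
        omega
      by_cases hcr : c ∈ rest.dropWhile (fun y => y == x)
      · rw [if_pos hcr, if_pos (hcl.mpr hcr), hcl_count]
      · rw [if_neg hcr, if_neg (fun h => hcr (hcl.mp h)),
          PySem.Dict.getD_insert]
        rw [if_neg hcx]
termination_by l.length
decreasing_by
  have := List.length_dropWhile_le (fun y => y == x) rest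
  simp; omega

-- ===== VERDICT (by name: the statement is the Claim_ definition above) =====
theorem solve_spec : Claim_equal_solve := by
  unfold Claim_equal_solve Spec_solve
  intro n s _
  unfold solve solve_alt
  have hA : PySem.Dict.ofList [('A',(0:Int)),('B',0),('C',0),('D',0)] =
      PySem.Dict.mk [('A',(0:Int)),('B',0),('C',0),('D',0)] := by rfl
  simp only [hA, dict_fold_inv]
  have hs : (PySem.List.sorted s.toList (fun x => x) false).Pairwise (· ≤ ·) := by
    simpa using PySem.List.sorted_pairwise s.toList (fun x => x)
  have hperm : (PySem.List.sorted s.toList (fun x => x) false).Perm s.toList :=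
    PySem.List.sorted_perm s.toList (fun x => x) false
  have hterm : ∀ c : Char,
      (runLoop (PySem.List.sorted s.toList (fun x => x) false) PySem.Dict.empty).getD c 0 =
        (s.toList.count c : Int) := by
    intro c
    rw [runLoop_getD _ hs]
    by_cases hm : c ∈ PySem.List.sorted s.toList (fun x => x) false
    · rw [if_pos hm, hperm.count_eq]
    · rw [if_neg hm, PySem.Dict.getD_empty]
      have : c ∉ s.toList := fun h => hm ((PySem.List.mem_sorted _ _ _ _).mpr h)
      rw [List.count_eq_zero.mpr this]
      simp
  simp [hterm]
  ring
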